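-- pv_equiv track=rewrite | github.com/SplinchGit/AGI | src/core/self_modifying_chat.py | _has_repetitive_responses
-- ===== SOURCE A (Python) =====
-- def _has_repetitive_responses(messages):
--     """Check if responses are too similar"""
--     ai_responses = [m['message'] for m in messages if m['speaker'] in ['Qwen', 'Claude']]
--
--     if len(ai_responses) < 3:
--         return False
--
--     # Simple similarity check
--     for i in range(len(ai_responses) - 2):
--         if ai_responses[i][:50] == ai_responses[i+1][:50] == ai_responses[i+2][:50]:
--             return True
--
--     return False
-- ===== SOURCE B (Python) =====
-- def _has_repetitive_responses(messages):
--     """Check if responses are too similar"""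
--     prev = None
--     run = 0
--     for m in messages:
--         if m['speaker'] not in ('Qwen', 'Claude'):
--             continue
--         p = m['message'][:50]
--         if p == prev:
--             run += 1
--         else:
--             prev = p
--             run = 1
--         if run == 3:
--             return True
--     return False
-- ===== Notes on version B (the rewrite author's own statement) =====
-- stated objective: alternative
-- what changed: B makes a single streaming pass with a run-length counter and early exit, instead of first materialising the list of AI responses and then comparing overlapping index triples (slicing each response up to three times).
import Mathlib
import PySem

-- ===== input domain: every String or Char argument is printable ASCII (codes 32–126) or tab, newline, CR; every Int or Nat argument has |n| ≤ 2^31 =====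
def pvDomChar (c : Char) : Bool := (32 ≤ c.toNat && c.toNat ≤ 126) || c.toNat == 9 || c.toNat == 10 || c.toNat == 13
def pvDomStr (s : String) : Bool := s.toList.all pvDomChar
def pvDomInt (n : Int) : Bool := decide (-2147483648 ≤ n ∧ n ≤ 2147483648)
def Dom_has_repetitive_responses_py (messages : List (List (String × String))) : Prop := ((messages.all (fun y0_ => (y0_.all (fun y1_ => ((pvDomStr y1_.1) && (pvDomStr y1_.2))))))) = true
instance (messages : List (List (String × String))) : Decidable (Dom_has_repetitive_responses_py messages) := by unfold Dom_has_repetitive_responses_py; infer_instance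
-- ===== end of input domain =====

-- B replaces A's build-list-then-compare-index-triples scan by a single streaming pass with a
-- run-length counter and early exit (objective: alternative; same asymptotic cost).


-- ===== PORT A =====
-- m['k'] on a dict built from the association list (total form; Pre_ guarantees the key is present)
def pvDget (m : List (String × String)) (k : String) : String :=
  ((PySem.Dict.ofList m).get? k).getD ""

-- s[:50]
def pvPfx (s : String) : String := PySem.Str.slice s none (some 50)

-- is this message from an AI speaker? (m['speaker'] in ['Qwen', 'Claude'])
def pvIsAI (m : List (String × String)) : Bool :=
  pvDget m "speaker" == "Qwen" || pvDget m "speaker" == "Claude"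

def has_repetitive_responses_py (messages : List (List (String × String))) : Bool :=
  let ai : List String := (messages.filter pvIsAI).map (fun m => pvDget m "message")
  if ai.length < 3 then false
  else
    (PySem.List.pyRange 0 ((ai.length : Int) - 2) 1).any (fun i =>
      (pvPfx (PySem.List.pyGetD ai i "") == pvPfx (PySem.List.pyGetD ai (i + 1) "")) &&
      (pvPfx (PySem.List.pyGetD ai (i + 1) "") == pvPfx (PySem.List.pyGetD ai (i + 2) "")))

-- ===== PORT B =====
-- B's for-loop: prev = last AI prefix seen (None initially), run = length of the current run
def pvAltLoop : List (List (String × String)) → Option String → Int → Bool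
  | [], _, _ => false
  | m :: rest, prev, run =>
    if !(pvIsAI m) then pvAltLoop rest prev run
    else
      let p := pvPfx (pvDget m "message")
      let st := if some p == prev then (prev, run + 1) else (some p, (1 : Int))
      if st.2 == 3 then true else pvAltLoop rest st.1 st.2

def has_repetitive_responses_py_alt (messages : List (List (String × String))) : Bool :=
  pvAltLoop messages none 0

-- ===== PRECONDITION & SPEC =====
-- Pre_ excludes exactly the inputs on which the Python A raises KeyError: a message without a
-- 'speaker' key, or an AI-speaker message without a 'message' key.
def Pre_has_repetitive_responses_py (messages : List (List (String × String))) : Prop :=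
  ∀ m ∈ messages,
    ((PySem.Dict.ofList m).get? "speaker").isSome = true ∧
    ((((PySem.Dict.ofList m).get? "speaker") = some "Qwen" ∨
      ((PySem.Dict.ofList m).get? "speaker") = some "Claude") →
      ((PySem.Dict.ofList m).get? "message").isSome = true)
instance (messages : List (List (String × String))) : Decidable (Pre_has_repetitive_responses_py messages) := by unfold Pre_has_repetitive_responses_py; infer_instance

def pvWitness_has_repetitive_responses_py : (List (List (String × String))) :=
  [[("speaker", "Qwen"), ("message", "hi")], [("speaker", "user"), ("message", "yo")]]

def Spec_has_repetitive_responses_py (messages : List (List (String × String))) (out : Bool) : Prop := out = has_repetitive_responses_py_alt messages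
instance (messages : List (List (String × String))) (out : Bool) : Decidable (Spec_has_repetitive_responses_py messages out) := by unfold Spec_has_repetitive_responses_py; infer_instance

-- ===== CLAIM (what is proved, stated in full; the proofs are below) =====
def Claim_equal_has_repetitive_responses_py : Prop := ∀ (messages : List (List (String × String))), Dom_has_repetitive_responses_py messages → Pre_has_repetitive_responses_py messages → Spec_has_repetitive_responses_py messages (has_repetitive_responses_py messages)

-- ===== LEMMAS AND PROOFS =====

-- proof-side: "some adjacent triple of equal elements" as structural recursion
def pvTriple : List String → Bool
  | a :: b :: c :: rest => (a == b && b == c) || pvTriple (b :: c :: rest)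
  | _ => false

-- proof-side: B's loop over the already-extracted prefix list
def pvScan : List String → Option String → Int → Bool
  | [], _, _ => false
  | p :: rest, prev, run =>
    let st := if some p == prev then (prev, run + 1) else (some p, (1 : Int))
    if st.2 == 3 then true else pvScan rest st.1 st.2

lemma pvAltLoop_eq_scan (ms : List (List (String × String))) :
    ∀ prev run, pvAltLoop ms prev run =
      pvScan ((ms.filter pvIsAI).map (fun m => pvPfx (pvDget m "message"))) prev run := by
  induction ms with
  | nil => intro prev run; rfl
  | cons m rest ih =>
    intro prev run
    by_cases h : pvIsAI m = true
    · simp [pvAltLoop, pvScan, h, ih]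
    · simp [pvAltLoop, h, ih]

lemma pvScan_one_two (xs : List String) :
    ∀ x, (pvScan xs (some x) 1 = pvTriple (x :: xs)) ∧
         (pvScan xs (some x) 2 = pvTriple (x :: x :: xs)) := by
  induction xs with
  | nil => intro x; constructor <;> rfl
  | cons y ys ih =>
    intro x
    constructor
    · by_cases h : y = x
      · subst h
        simpa [pvScan] using (ih y).2
      · have hb : (y == x) = false := by simp [h]
        have hb' : (x == y) = false := by
          simp only [beq_eq_false_iff_ne, ne_eq]; exact fun e => h e.symm
        have hstep : pvScan (y :: ys) (some x) 1 = pvScan ys (some y) 1 := by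
          simp [pvScan, hb]
        rw [hstep, (ih y).1]
        cases ys with
        | nil => simp [pvTriple]
        | cons z zs => simp [pvTriple, hb']
    · by_cases h : y = x
      · subst h; simp [pvScan, pvTriple]
      · have hb : (y == x) = false := by simp [h]
        have hb' : (x == y) = false := by
          simp only [beq_eq_false_iff_ne, ne_eq]; exact fun e => h e.symm
        have hstep : pvScan (y :: ys) (some x) 2 = pvScan ys (some y) 1 := by
          simp [pvScan, hb]
        rw [hstep, (ih y).1]
        cases ys with
        | nil => simp [pvTriple, hb']
        | cons z zs => simp [pvTriple, hb']

lemma pvScan_start (xs : List String) : pvScan xs none 0 = pvTriple xs := by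
  cases xs with
  | nil => rfl
  | cons y ys =>
    have : pvScan (y :: ys) none 0 = pvScan ys (some y) 1 := by simp [pvScan]
    rw [this, (pvScan_one_two ys y).1]

-- A's indexed triple scan over ai equals pvTriple of the prefix list
lemma pvIdx_eq_triple (ai : List String) :
    ((List.range (ai.length - 2)).any (fun k =>
      (pvPfx (ai.getD k "") == pvPfx (ai.getD (k + 1) "")) &&
      (pvPfx (ai.getD (k + 1) "") == pvPfx (ai.getD (k + 2) "")))) =
    pvTriple (ai.map pvPfx) := by
  induction ai with
  | nil => rfl
  | cons a rest ih =>
    cases rest with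
    | nil => rfl
    | cons b rest' =>
      cases rest' with
      | nil => rfl
      | cons c t =>
        have hlen : (a :: b :: c :: t).length - 2 = (t.length + 1) := by
          simp
        have hlen' : (b :: c :: t).length - 2 = t.length := by simp
        rw [hlen, List.range_succ_eq_map]
        simp only [List.any_cons, List.any_map, Function.comp_def]
        have hshift : ((List.range t.length).any (fun k =>
            (pvPfx ((a :: b :: c :: t).getD (Nat.succ k) "") ==
             pvPfx ((a :: b :: c :: t).getD (Nat.succ k + 1) "")) &&
            (pvPfx ((a :: b :: c :: t).getD (Nat.succ k + 1) "") ==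
             pvPfx ((a :: b :: c :: t).getD (Nat.succ k + 2) "")))) =
            pvTriple ((b :: c :: t).map pvPfx) := by
          rw [← ih, hlen']
          refine PySem.List.any_congr_mem (fun k _ => ?_)
          simp [Nat.succ_eq_add_one]
        rw [hshift]
        simp [pvTriple, List.getD]

lemma pvRange_any_eq (ai : List String) :
    ((PySem.List.pyRange 0 ((ai.length : Int) - 2) 1).any (fun i =>
      (pvPfx (PySem.List.pyGetD ai i "") == pvPfx (PySem.List.pyGetD ai (i + 1) "")) &&
      (pvPfx (PySem.List.pyGetD ai (i + 1) "") == pvPfx (PySem.List.pyGetD ai (i + 2) "")))) =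
    ((List.range (ai.length - 2)).any (fun k =>
      (pvPfx (ai.getD k "") == pvPfx (ai.getD (k + 1) "")) &&
      (pvPfx (ai.getD (k + 1) "") == pvPfx (ai.getD (k + 2) "")))) := by
  rw [PySem.List.pyRange_one]
  have hcast : (((ai.length : Int) - 2) - 0).toNat = ai.length - 2 := by omega
  rw [hcast, List.any_map]
  refine PySem.List.any_congr_mem (fun k _ => ?_)
  have h1 : (0 : Int) + (k : Int) = ((k : Nat) : Int) := by omega
  have h2 : (k : Int) + 1 = (((k + 1 : Nat)) : Int) := by push_cast; omega
  have h3 : (k : Int) + 2 = (((k + 2 : Nat)) : Int) := by push_cast; omega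
  simp only [Function.comp_def, h1, h2, h3, PySem.List.pyGetD_natCast]

lemma pvTriple_short (xs : List String) (h : xs.length < 3) : pvTriple xs = false := by
  match xs, h with
  | [], _ => rfl
  | [a], _ => rfl
  | [a, b], _ => rfl

-- ===== VERDICT (by name: the statement is the Claim_ definition above) =====
theorem has_repetitive_responses_py_spec : Claim_equal_has_repetitive_responses_py := by
  intro messages _ _
  show has_repetitive_responses_py messages = has_repetitive_responses_py_alt messages
  unfold has_repetitive_responses_py has_repetitive_responses_py_alt
  rw [pvAltLoop_eq_scan, pvScan_start]
  set ai : List String := (messages.filter pvIsAI).map (fun m => pvDget m "message") with hai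
  have hmap : (messages.filter pvIsAI).map (fun m => pvPfx (pvDget m "message")) = ai.map pvPfx := by
    rw [hai, List.map_map]; rfl
  rw [hmap]
  by_cases hlen : ai.length < 3
  · simp only [hlen, if_true]
    have : (ai.map pvPfx).length < 3 := by simpa using hlen
    exact (pvTriple_short _ this).symm
  · simp only [hlen, if_false]
    rw [pvRange_any_eq, pvIdx_eq_triple]
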